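-- pv_equiv track=rewrite | github.com/quemeb/SNP-Annotation-Agreement-and-Downstream-Impact-Analysis | scripts/ensembl_refseq_UniProt.py | map_ensembl
-- ===== SOURCE A (Python) =====
-- def map_ensembl(genes, ens_map):
--     mapped, total_unmatched, unique_unmatched = [], 0, set()
--     for gene_list in genes:
--         temp, seen = [], set()
--         for g in gene_list:
--             mg = ens_map.get(g)
--             if mg: temp.append(mg)
--             else:
--                 if g not in seen:
--                     seen.add(g)
--                     total_unmatched += 1
--                 unique_unmatched.add(g)
--         mapped.append(temp)
--     return mapped, total_unmatched, len(unique_unmatched)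
-- ===== SOURCE B (Python) =====
-- def map_ensembl(genes, ens_map):
--     # B: resolve each distinct gene ONCE into a classification table, then answer
--     # everything from the table: mapped via table lookups, per-list unmatched
--     # counts via set intersection with the table's bad-gene set.
--     cls = {}
--     for gl in genes:
--         for g in gl:
--             if g not in cls:
--                 cls[g] = ens_map.get(g) or None
--     bad = {g for g in cls if cls[g] is None}
--     mapped = [[cls[g] for g in gl if cls[g] is not None] for gl in genes]
--     total_unmatched = sum(len(set(gl) & bad) for gl in genes)
--     return mapped, total_unmatched, len(bad)
-- ===== Notes on version B (the rewrite author's own statement) =====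
-- stated objective: alternative
-- what changed: Replaces A's single interleaved loop carrying four live accumulators by a two-phase table design: phase 1 builds a classification table resolving each distinct gene once (truthy mapped value or None); phase 2 reads the mapped lists off the table, obtains each per-list deduplicated unmatched count as the size of the intersection of set(gene_list) with the table's bad-gene set, and returns that set's size as the unique count.
import Mathlib
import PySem

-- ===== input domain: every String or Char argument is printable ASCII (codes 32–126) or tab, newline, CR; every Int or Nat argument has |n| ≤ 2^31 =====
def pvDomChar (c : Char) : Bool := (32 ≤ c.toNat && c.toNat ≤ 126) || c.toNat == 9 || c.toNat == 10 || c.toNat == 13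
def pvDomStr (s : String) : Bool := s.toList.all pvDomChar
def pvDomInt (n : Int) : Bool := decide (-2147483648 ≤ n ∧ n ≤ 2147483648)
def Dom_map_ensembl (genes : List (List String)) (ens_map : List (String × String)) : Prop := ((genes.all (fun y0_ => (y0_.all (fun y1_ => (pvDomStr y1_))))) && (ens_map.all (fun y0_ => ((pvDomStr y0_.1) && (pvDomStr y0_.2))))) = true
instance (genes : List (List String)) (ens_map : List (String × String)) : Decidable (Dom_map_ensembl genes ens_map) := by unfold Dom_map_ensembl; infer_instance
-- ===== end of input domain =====

-- B replaces A's single interleaved four-accumulator loop by a two-phase design: a classification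
-- table resolving each distinct gene once, from which the mapped lists are read off by lookup, the
-- per-list unmatched counts become set intersections with the table's bad-gene set, and the unique
-- count is that set's size; objective: alternative (same asymptotic cost).


-- ===== PORT A =====
-- A: one interleaved loop over genes carrying four accumulators.
-- dict.get on the association list: first match (insertion-order dict lookup)
def lookA (m : List (String × String)) (g : String) : Option String :=
  match m with
  | [] => none
  | (k, v) :: t => if k == g then some v else lookA t g

-- truthiness of `mg` in `if mg:` — None and "" are falsy
def truthyA (mg : Option String) : Bool :=
  match mg with
  | none => false
  | some v => !(v == "")

-- the inner `for g in gene_list` loop; state = (temp, seen, total_unmatched, unique_unmatched)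
def innerA (m : List (String × String)) :
    List String → List String × PySem.Set String × Int × PySem.Set String →
    List String × PySem.Set String × Int × PySem.Set String
  | [], st => st
  | g :: rest, (temp, seen, total, uniq) =>
    let mg := lookA m g
    if truthyA mg then
      innerA m rest (temp ++ [mg.getD ""], seen, total, uniq)
    else
      let (seen', total') :=
        if PySem.Set.contains seen g then (seen, total)
        else (PySem.Set.add seen g, total + 1)
      innerA m rest (temp, seen', total', PySem.Set.add uniq g)

def map_ensembl (genes : List (List String)) (ens_map : List (String × String)) : List (List String) × Int × Int :=
  let st := genes.foldl
    (fun (st : List (List String) × Int × PySem.Set String) gl =>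
      let r := innerA ens_map gl ([], PySem.Set.empty, st.2.1, st.2.2)
      (st.1 ++ [r.1], r.2.2.1, r.2.2.2))
    ([], 0, PySem.Set.empty)
  (st.1, st.2.1, (PySem.Set.len st.2.2 : Int))

-- ===== PORT B =====
-- B: phase 1 builds a classification table cls resolving each distinct gene once.
def lookB (m : List (String × String)) (g : String) : Option String :=
  (m.find? (fun p => p.1 == g)).map (·.2)

-- `ens_map.get(g) or None`: the mapped value if truthy, else None
def classifyB (m : List (String × String)) (g : String) : Option String :=
  match lookB m g with
  | none => none
  | some v => if v == "" then none else some v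

-- the inner `for g in gl: if g not in cls: cls[g] = …` loop
def buildB (m : List (String × String)) (gl : List String)
    (d : PySem.Dict String (Option String)) : PySem.Dict String (Option String) :=
  gl.foldl (fun d g => if d.contains g then d else d.insert g (classifyB m g)) d

-- phase 1: the classification table (the `cls = {}` loop over genes)
def clsB (genes : List (List String)) (ens_map : List (String × String)) :
    PySem.Dict String (Option String) :=
  genes.foldl (fun d gl => buildB ens_map gl d) PySem.Dict.empty

-- bad = {g for g in cls if cls[g] is None}  (consumed only as a set: len, membership)
def badB (genes : List (List String)) (ens_map : List (String × String)) : PySem.Set String :=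
  (clsB genes ens_map).keys.filter (fun g => ((clsB genes ens_map).getD g none).isNone)

-- phase 2: everything is answered from the table
def map_ensembl_alt (genes : List (List String)) (ens_map : List (String × String)) : List (List String) × Int × Int :=
  (genes.map (fun gl => gl.filterMap (fun g => (clsB genes ens_map).getD g none)),
   (genes.map (fun gl =>
     ((PySem.Set.inter (PySem.Set.ofList gl) (badB genes ens_map)).length : Int))).sum,
   ((badB genes ens_map).length : Int))

-- ===== PRECONDITION & SPEC =====
def Spec_map_ensembl (genes : List (List String)) (ens_map : List (String × String)) (out : List (List String) × Int × Int) : Prop := out = map_ensembl_alt genes ens_map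
instance (genes : List (List String)) (ens_map : List (String × String)) (out : List (List String) × Int × Int) : Decidable (Spec_map_ensembl genes ens_map out) := by unfold Spec_map_ensembl; infer_instance

-- ===== CLAIM (what is proved, stated in full; the proofs are below) =====
def Claim_equal_map_ensembl : Prop := ∀ (genes : List (List String)) (ens_map : List (String × String)), Dom_map_ensembl genes ens_map → Spec_map_ensembl genes ens_map (map_ensembl genes ens_map)

-- ===== LEMMAS AND PROOFS =====

-- `not ens_map.get(g)` — unmatched: missing key or empty-string value
def unmatched (m : List (String × String)) (g : String) : Bool :=
  match lookB m g with
  | none => true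
  | some v => v == ""

theorem look_eq (m : List (String × String)) (g : String) : lookA m g = lookB m g := by
  induction m with
  | nil => rfl
  | cons p t ih =>
    obtain ⟨k, v⟩ := p
    simp only [lookA, lookB, List.find?]
    by_cases h : (k == g) = true
    · simp [h]
    · simp only [Bool.not_eq_true] at h
      simp [h, lookB] at ih ⊢
      exact ih

theorem truthy_eq (m : List (String × String)) (g : String) :
    truthyA (lookA m g) = !(unmatched m g) := by
  rw [look_eq]
  unfold truthyA unmatched
  cases lookB m g <;> simp

-- ----- A side: characterise the interleaved loop -----
theorem inner_eq (m : List (String × String)) (gl : List String) :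
    ∀ (temp : List String) (seen : PySem.Set String) (total : Int) (uniq : PySem.Set String),
    innerA m gl (temp, seen, total, uniq) =
      (temp ++ gl.filterMap (fun g => if unmatched m g then none else lookB m g),
       PySem.Set.update seen (gl.filter (fun g => unmatched m g)),
       total + ((PySem.Set.update seen (gl.filter (fun g => unmatched m g))).length : Int)
             - (seen.length : Int),
       PySem.Set.update uniq (gl.filter (fun g => unmatched m g))) := by
  induction gl with
  | nil =>
    intro temp seen total uniq
    simp [innerA, PySem.Set.update]
  | cons g rest ih =>
    intro temp seen total uniq
    simp only [innerA, truthy_eq, List.filter_cons, List.filterMap_cons]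
    by_cases hb : unmatched m g = true
    · by_cases hmem : g ∈ seen
      · simp [hb, ih, PySem.Set.update_cons, hmem]
      · have h1 : ∀ s : PySem.Set String, PySem.Set.update s (g :: List.filter (fun g => unmatched m g) rest)
            = PySem.Set.update (PySem.Set.add s g) (List.filter (fun g => unmatched m g) rest) :=
          fun s => PySem.Set.update_cons s g _
        simp only [hb, Bool.not_true, Bool.false_eq_true, if_false, if_true, ih, h1,
          PySem.Set.contains_eq_listContains, List.contains_eq_mem,
          decide_eq_true_eq, hmem, Prod.mk.injEq, true_and,
          PySem.Set.add_of_not_mem hmem]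
        constructor
        · simp only [List.length_append, List.length_cons, List.length_nil]
          push_cast
          ring
        · trivial
    · simp only [Bool.not_eq_true] at hb
      have hsome : ∃ v, lookB m g = some v ∧ (v == "") = false := by
        unfold unmatched at hb
        cases h : lookB m g with
        | none => rw [h] at hb; simp at hb
        | some v => rw [h] at hb; exact ⟨v, rfl, hb⟩
      obtain ⟨v, hv, _⟩ := hsome
      simp [hb, ih, look_eq, hv, List.append_assoc]

theorem outer_eq (m : List (String × String)) (gls : List (List String)) :
    ∀ (macc : List (List String)) (total : Int) (uniq : PySem.Set String),
    gls.foldl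
      (fun (st : List (List String) × Int × PySem.Set String) gl =>
        let r := innerA m gl ([], PySem.Set.empty, st.2.1, st.2.2)
        (st.1 ++ [r.1], r.2.2.1, r.2.2.2))
      (macc, total, uniq) =
      (macc ++ gls.map (fun gl =>
         gl.filterMap (fun g => if unmatched m g then none else lookB m g)),
       total + (gls.map (fun gl =>
         ((PySem.Set.ofList (gl.filter (fun g => unmatched m g))).length : Int))).sum,
       PySem.Set.update uniq ((gls.flatMap (fun gl => gl)).filter (fun g => unmatched m g))) := by
  induction gls with
  | nil =>
    intro macc total uniq
    simp [PySem.Set.update]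
  | cons gl rest ih =>
    intro macc total uniq
    simp only [List.foldl_cons]
    rw [inner_eq, ih]
    simp only [List.map_cons, List.flatMap_cons, List.filter_append, List.sum_cons,
      PySem.Set.update_append, List.nil_append,
      ← PySem.Set.update_nil_left, Prod.mk.injEq]
    refine ⟨by simp, ?_, ?_⟩
    · simp only [PySem.Set.empty, List.length_nil]
      push_cast
      ring
    · trivial

-- ----- B side: characterise the classification table -----
theorem classify_eq (m : List (String × String)) (g : String) :
    classifyB m g = if unmatched m g then none else lookB m g := by
  unfold classifyB unmatched
  cases h : lookB m g with
  | none => simp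
  | some v => by_cases hv : (v == "") = true <;> simp [hv]

theorem classify_isNone (m : List (String × String)) (g : String) :
    (classifyB m g).isNone = unmatched m g := by
  rw [classify_eq]
  by_cases h : unmatched m g = true
  · simp [h]
  · simp only [Bool.not_eq_true] at h
    unfold unmatched at h ⊢
    cases hl : lookB m g with
    | none => rw [hl] at h; simp at h
    | some v => rw [hl] at h; simp [h]

theorem build_get? (m : List (String × String)) (gl : List String) :
    ∀ (d : PySem.Dict String (Option String)) (x : String),
    (buildB m gl d).get? x =
      if d.contains x then d.get? x
      else if x ∈ gl then some (classifyB m x) else none := by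
  induction gl with
  | nil =>
    intro d x
    by_cases h : d.contains x = true
    · simp [buildB, h]
    · simp only [Bool.not_eq_true] at h
      simp [buildB, h, PySem.Dict.get?_eq_none_iff_contains]
  | cons g rest ih =>
    intro d x
    simp only [buildB, List.foldl_cons] at ih ⊢
    by_cases hg : d.contains g = true
    · rw [if_pos hg, ih]
      by_cases hx : d.contains x = true
      · simp [hx]
      · have hxg : x ≠ g := fun e => by rw [e] at hx; exact hx hg
        simp [hx, List.mem_cons, hxg]
    · rw [if_neg (by simp [hg]), ih]
      by_cases hxg : x = g
      · subst hxg
        simp [hg, PySem.Dict.contains_insert_self, PySem.Dict.get?_insert_self]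
      · rw [PySem.Dict.contains_insert, PySem.Dict.get?_insert_of_ne _ _ hxg]
        have hb : (x == g) = false := by simp [hxg]
        simp [hb, List.mem_cons, hxg]

theorem build_keys (m : List (String × String)) (gl : List String) :
    ∀ (d : PySem.Dict String (Option String)),
    (buildB m gl d).keys = PySem.Set.update d.keys gl := by
  induction gl with
  | nil => intro d; simp [buildB, PySem.Set.update]
  | cons g rest ih =>
    intro d
    simp only [buildB, List.foldl_cons] at ih ⊢
    rw [PySem.Set.update_cons]
    by_cases hg : d.contains g = true
    · rw [if_pos hg, ih, PySem.Set.add_of_mem ((PySem.Dict.contains_iff_mem_keys _ _).mp hg)]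
    · rw [if_neg (by simp [hg]), ih,
        PySem.Dict.keys_insert_of_not_contains _ _ (by simp [hg]),
        PySem.Set.add_of_not_mem (fun hm =>
          (by simp [hg] : ¬ d.contains g = true) ((PySem.Dict.contains_iff_mem_keys _ _).mpr hm))]

theorem cls_get? (m : List (String × String)) (gls : List (List String)) :
    ∀ (d : PySem.Dict String (Option String)) (x : String),
    (gls.foldl (fun d gl => buildB m gl d) d).get? x =
      if d.contains x then d.get? x
      else if x ∈ gls.flatMap (fun gl => gl) then some (classifyB m x) else none := by
  induction gls with
  | nil =>
    intro d x
    by_cases h : d.contains x = true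
    · simp [h]
    · simp only [Bool.not_eq_true] at h
      simp [h, PySem.Dict.get?_eq_none_iff_contains]
  | cons gl rest ih =>
    intro d x
    simp only [List.foldl_cons]
    rw [ih]
    have hbg := build_get? m gl d x
    by_cases hx : d.contains x = true
    · have h1 : (buildB m gl d).contains x = true := by
        rw [PySem.Dict.contains_eq_isSome_get?, hbg, if_pos hx,
          ← PySem.Dict.contains_eq_isSome_get?]
        exact hx
      rw [if_pos h1, hbg, if_pos hx, if_pos hx]
    · by_cases hmem : x ∈ gl
      · have h1 : (buildB m gl d).contains x = true := by
          rw [PySem.Dict.contains_eq_isSome_get?, hbg, if_neg hx, if_pos hmem]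
          rfl
        have h2 : x ∈ List.flatMap (fun gl => gl) (gl :: rest) :=
          List.mem_flatMap.mpr ⟨gl, List.mem_cons_self, hmem⟩
        rw [if_pos h1, hbg, if_neg hx, if_pos hmem, if_neg hx, if_pos h2]
      · have h1 : ¬ (buildB m gl d).contains x = true := by
          rw [PySem.Dict.contains_eq_isSome_get?, hbg, if_neg hx, if_neg hmem]
          simp
        rw [if_neg h1, if_neg hx]
        have h2 : (x ∈ List.flatMap (fun gl => gl) (gl :: rest)) ↔
            (x ∈ List.flatMap (fun gl => gl) rest) := by
          simp [List.flatMap_cons, List.mem_append, hmem]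
        by_cases h3 : x ∈ List.flatMap (fun gl => gl) rest
        · rw [if_pos h3, if_pos (h2.mpr h3)]
        · rw [if_neg h3, if_neg (fun h => h3 (h2.mp h))]

theorem cls_keys (m : List (String × String)) (gls : List (List String)) :
    ∀ (d : PySem.Dict String (Option String)),
    (gls.foldl (fun d gl => buildB m gl d) d).keys =
      PySem.Set.update d.keys (gls.flatMap (fun gl => gl)) := by
  induction gls with
  | nil => intro d; simp [PySem.Set.update]
  | cons gl rest ih =>
    intro d
    simp only [List.foldl_cons, List.flatMap_cons]
    rw [ih, build_keys, PySem.Set.update_append]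

-- dedup and filter commute
theorem ofList_filter (p : String → Bool) (l : List String) :
    PySem.Set.ofList (l.filter p) = (PySem.Set.ofList l).filter p := by
  induction l with
  | nil => rfl
  | cons x xs ih =>
    by_cases hp : p x = true
    · rw [List.filter_cons_of_pos hp, PySem.Set.ofList_cons, PySem.Set.ofList_cons, ih,
        List.filter_cons_of_pos hp]
      show _ :: List.filter _ (List.filter p _) = _ :: List.filter p (List.filter _ _)
      rw [List.filter_filter, List.filter_filter]
      congr 1
      exact List.filter_congr (fun y _ => by rw [Bool.and_comm])
    · rw [List.filter_cons_of_neg (by simp [hp]), PySem.Set.ofList_cons,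
        List.filter_cons_of_neg (by simp [hp]), ih]
      show List.filter p _ = List.filter p (List.filter _ _)
      rw [List.filter_filter]
      refine (List.filter_congr (fun y _ => ?_)).symm
      by_cases hxy : (y == x) = true
      · have : y = x := by simpa using hxy
        subst this
        simp [hp]
      · simp [hxy]

theorem clsB_getD (genes : List (List String)) (m : List (String × String))
    (x : String) (hx : x ∈ genes.flatMap (fun gl => gl)) :
    (clsB genes m).getD x none = classifyB m x := by
  rw [PySem.Dict.getD_eq_get?_getD]
  unfold clsB
  rw [cls_get?, if_neg (by rw [PySem.Dict.contains_empty]; simp), if_pos hx]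
  rfl

theorem clsB_keys (genes : List (List String)) (m : List (String × String)) :
    (clsB genes m).keys = PySem.Set.ofList (genes.flatMap (fun gl => gl)) := by
  unfold clsB
  rw [cls_keys, PySem.Dict.keys_empty, PySem.Set.update_nil_left]

theorem badB_eq (genes : List (List String)) (m : List (String × String)) :
    badB genes m =
      PySem.Set.ofList ((genes.flatMap (fun gl => gl)).filter (fun g => unmatched m g)) := by
  unfold badB
  rw [ofList_filter, clsB_keys]
  exact List.filter_congr (fun g hg => by
    rw [clsB_getD genes m g ((PySem.Set.mem_ofList _ _).mp hg), classify_isNone])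

theorem inter_bad (genes : List (List String)) (m : List (String × String))
    (gl : List String) (hgl : gl ∈ genes) :
    PySem.Set.inter (PySem.Set.ofList gl) (badB genes m) =
      PySem.Set.ofList (gl.filter (fun g => unmatched m g)) := by
  rw [badB_eq, ofList_filter, ofList_filter]
  show List.filter _ (PySem.Set.ofList gl) = List.filter _ (PySem.Set.ofList gl)
  refine List.filter_congr (fun g hg => ?_)
  have hgf : g ∈ genes.flatMap (fun gl => gl) :=
    List.mem_flatMap.mpr ⟨gl, hgl, (PySem.Set.mem_ofList _ _).mp hg⟩
  rw [PySem.Set.contains_eq_listContains, List.contains_eq_mem]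
  simp only [PySem.Set.mem_ofList, List.mem_filter, hgf, true_and]
  by_cases hu : unmatched m g = true <;> simp [hu]

-- ===== VERDICT (by name: the statement is the Claim_ definition above) =====
theorem map_ensembl_spec : Claim_equal_map_ensembl := by
  intro genes m _
  unfold Spec_map_ensembl map_ensembl map_ensembl_alt
  rw [outer_eq]
  refine Prod.ext ?_ (Prod.ext ?_ ?_)
  · show [] ++ _ = _
    rw [List.nil_append]
    refine List.map_eq_map_iff.mpr (fun gl hgl => ?_)
    refine List.filterMap_congr (fun g hg => ?_)
    rw [clsB_getD genes m g (List.mem_flatMap.mpr ⟨gl, hgl, hg⟩), classify_eq]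
  · show (0 : Int) + _ = _
    rw [zero_add]
    congr 1
    refine List.map_eq_map_iff.mpr (fun gl hgl => ?_)
    rw [inter_bad genes m gl hgl]
  · show ((PySem.Set.len (PySem.Set.update PySem.Set.empty
        ((genes.flatMap (fun gl => gl)).filter (fun g => unmatched m g)))) : Int) = _
    rw [badB_eq]
    show ((PySem.Set.update [] _).length : Int) = _
    rw [PySem.Set.update_nil_left]
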